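-- pv_equiv track=rewrite | github.com/Fill84/EntroPhone | src/integrations/calendar_agent.py | _extract_title_for_delete
-- ===== SOURCE A (Python) =====
-- def _extract_title_for_delete(text: str) -> str:
--     """Extract the title to delete from the command."""
--     prefixes = [
--         "verwijder afspraak", "verwijder", "delete appointment",
--         "delete", "annuleer", "cancel", "schrap",
--     ]
--     text_lower = text.lower()
--     for prefix in sorted(prefixes, key=len, reverse=True):
--         if text_lower.startswith(prefix):
--             return text[len(prefix):].strip().strip(".:,")
--     return text.strip()
-- ===== SOURCE B (Python) =====
-- def _extract_title_for_delete(text: str) -> str: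
--     """Extract the title to delete from the command."""
--     prefixes = {
--         "verwijder afspraak", "verwijder", "delete appointment",
--         "delete", "annuleer", "cancel", "schrap",
--     }
--     low = text.lower()
--     # longest match wins: scan candidate match lengths downwards, testing the
--     # text's own prefix for set membership (a prefix longer than the text cannot match)
--     i = min(len(text), max(len(p) for p in prefixes))
--     while i > 0:
--         if low[:i] in prefixes:
--             return text[i:].strip().strip(".:,")
--         i -= 1
--     return text.strip()
-- ===== Notes on version B (the rewrite author's own statement) =====
-- stated objective: alternative
-- what changed: Inverts the search: instead of sorting the pattern list and scanning it with startswith, B scans candidate match lengths downward from min(len(text), longest pattern) and tests the text's own lowercased prefix for membership in a set of patterns, so the per-pattern startswith loop disappears.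
import Mathlib
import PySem

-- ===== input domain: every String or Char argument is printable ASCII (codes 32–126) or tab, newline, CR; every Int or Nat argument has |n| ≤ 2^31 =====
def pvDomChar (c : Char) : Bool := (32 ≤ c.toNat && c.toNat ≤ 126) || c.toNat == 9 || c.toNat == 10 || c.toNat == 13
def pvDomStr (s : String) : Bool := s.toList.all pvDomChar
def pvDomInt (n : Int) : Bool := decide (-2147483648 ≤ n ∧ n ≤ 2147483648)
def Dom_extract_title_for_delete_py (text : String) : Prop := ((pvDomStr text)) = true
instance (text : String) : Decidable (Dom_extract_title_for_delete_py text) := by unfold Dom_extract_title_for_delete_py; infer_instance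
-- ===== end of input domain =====

-- B inverts the search: instead of sorting the pattern list and scanning it with startswith,
-- it scans candidate match lengths downward, testing the text's own lowercased prefix for
-- membership in a set of patterns; objective: alternative.


-- ===== PORT A =====
-- the for-loop of A: first prefix of the (already sorted) list that textLower starts with
def pvDeleteLoopA (text textLower : String) : List String → String
  | [] => PySem.Str.strip text
  | p :: rest =>
    if PySem.Str.startswith textLower p then
      PySem.Str.stripChars (PySem.Str.strip (PySem.Str.slice text (some (PySem.Str.len p)) none)) ".:,"
    else pvDeleteLoopA text textLower rest

def extract_title_for_delete_py (text : String) : String :=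
  let prefixes : List String := ["verwijder afspraak", "verwijder", "delete appointment",
    "delete", "annuleer", "cancel", "schrap"]
  let textLower := PySem.Str.lower text
  pvDeleteLoopA text textLower (PySem.List.sorted prefixes (fun p => PySem.Str.len p) true)

-- ===== PORT B =====
-- the prefix set of B (a Python set literal)
def pvPrefixSet : PySem.Set String := PySem.Set.ofList ["verwijder afspraak", "verwijder",
  "delete appointment", "delete", "annuleer", "cancel", "schrap"]

-- the while-loop of B: i counts down to 0; tests low[:i] for membership in the set
def pvDeleteLoopB (text low : String) : Nat → String
  | 0 => PySem.Str.strip text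
  | (j + 1) =>
    if PySem.Set.contains pvPrefixSet (PySem.Str.slice low none (some ((j + 1 : Nat) : Int))) then
      PySem.Str.stripChars (PySem.Str.strip (PySem.Str.slice text (some ((j + 1 : Nat) : Int)) none)) ".:,"
    else pvDeleteLoopB text low j

def extract_title_for_delete_py_alt (text : String) : String :=
  let low := PySem.Str.lower text
  let maxlen := ((PySem.List.max? (pvPrefixSet.map (fun p => PySem.Str.len p)) (fun x => x)).getD 0).toNat
  pvDeleteLoopB text low (min (PySem.Str.len text).toNat maxlen)

-- ===== PRECONDITION & SPEC =====
def Spec_extract_title_for_delete_py (text : String) (out : String) : Prop := out = extract_title_for_delete_py_alt text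
instance (text : String) (out : String) : Decidable (Spec_extract_title_for_delete_py text out) := by unfold Spec_extract_title_for_delete_py; infer_instance

-- ===== CLAIM (what is proved, stated in full; the proofs are below) =====
def Claim_equal_extract_title_for_delete_py : Prop := ∀ (text : String), Dom_extract_title_for_delete_py text → Spec_extract_title_for_delete_py text (extract_title_for_delete_py text)

-- ===== LEMMAS AND PROOFS =====
-- the stable length-descending sort of A's concrete prefix list, computed once
theorem pvSortedPrefixes :
    PySem.List.sorted ["verwijder afspraak", "verwijder", "delete appointment",
      "delete", "annuleer", "cancel", "schrap"] (fun p => PySem.Str.len p) true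
    = ["verwijder afspraak", "delete appointment", "verwijder", "annuleer",
       "delete", "cancel", "schrap"] := by decide

-- B's start value: the longest pattern length is 18
theorem pvMaxLen :
    ((PySem.List.max? (pvPrefixSet.map (fun p => PySem.Str.len p)) (fun x => x)).getD 0).toNat = 18 := by decide

-- low[:i] equals p (for i within the text) iff p has length i and low starts with p
theorem pvSliceEq (low p : String) (i : Nat) (hi : i ≤ low.toList.length) :
    (PySem.Str.slice low none (some ((i : Nat) : Int)) = p)
      ↔ (p.toList.length = i ∧ PySem.Str.startswith low p = true) := by
  have hi' : i ≤ low.length := by rw [← String.length_toList]; exact hi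
  constructor
  · intro h
    subst h
    constructor
    · simp [PySem.Str.slice, PySem.List.slice_to_natCast]
      omega
    · rw [PySem.Str.startswith_eq, PySem.Chars.startswith_iff]
      simp [PySem.Str.slice, PySem.List.slice_to_natCast, List.take_prefix]
  · rintro ⟨hl, hsw⟩
    rw [PySem.Str.startswith_eq, PySem.Chars.startswith_iff] at hsw
    have h2 := (List.prefix_iff_eq_take).1 hsw
    apply String.ext ?_
    show (PySem.Str.slice low none (some ((i : Nat) : Int))).toList = p.toList
    rw [hl] at h2
    simp [PySem.Str.slice, PySem.List.slice_to_natCast, ← h2]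

-- membership of low[:i] in the prefix set, characterised by startswith
theorem pvSliceMem (low : String) (i : Nat) (hi : i ≤ low.toList.length) :
    PySem.Set.contains pvPrefixSet (PySem.Str.slice low none (some ((i : Nat) : Int))) = true
      ↔ ∃ p ∈ (["verwijder afspraak", "verwijder", "delete appointment",
          "delete", "annuleer", "cancel", "schrap"] : List String),
          p.toList.length = i ∧ PySem.Str.startswith low p = true := by
  rw [PySem.Set.contains_iff]
  simp only [pvPrefixSet, PySem.Set.mem_ofList, List.mem_cons, List.not_mem_nil, or_false,
    pvSliceEq low _ i hi]
  simp only [exists_eq_or_imp, exists_eq_left]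

-- no pattern of length k matches ⇒ the set test at k is false
theorem pvNoHit (low : String) (k : Nat) (hk : k ≤ low.toList.length)
    (h : ∀ p ∈ (["verwijder afspraak", "verwijder", "delete appointment",
        "delete", "annuleer", "cancel", "schrap"] : List String),
        p.toList.length = k → PySem.Str.startswith low p = false) :
    PySem.Set.contains pvPrefixSet (PySem.Str.slice low none (some ((k : Nat) : Int))) = false := by
  rw [← Bool.not_eq_true, pvSliceMem low k hk]
  rintro ⟨p, hp, hl, hsw⟩
  rw [h p hp hl] at hsw
  exact Bool.false_ne_true hsw

-- descending the loop over non-matching lengths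
theorem pvLoopDescend (text low : String) (i j : Nat) (hj : j ≤ i)
    (h : ∀ k, j < k → k ≤ i →
      PySem.Set.contains pvPrefixSet (PySem.Str.slice low none (some ((k : Nat) : Int))) = false) :
    pvDeleteLoopB text low i = pvDeleteLoopB text low j := by
  induction i with
  | zero => have : j = 0 := by omega
            rw [this]
  | succ n ih =>
    rcases Nat.eq_or_lt_of_le hj with he | hlt
    · rw [he]
    · rw [pvDeleteLoopB, h (n+1) (by omega) (le_refl _)]
      simp only [Bool.false_eq_true, if_false]
      exact ih (by omega) (fun k hk1 hk2 => h k hk1 (by omega))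

-- descending to a hit at j0
theorem pvHit (text low : String) (m j0 : Nat) (hj0 : 0 < j0) (hle : j0 ≤ m)
    (hmiss : ∀ k, j0 < k → k ≤ m →
      PySem.Set.contains pvPrefixSet (PySem.Str.slice low none (some ((k : Nat) : Int))) = false)
    (hhit : PySem.Set.contains pvPrefixSet (PySem.Str.slice low none (some ((j0 : Nat) : Int))) = true) :
    pvDeleteLoopB text low m
      = PySem.Str.stripChars (PySem.Str.strip (PySem.Str.slice text (some ((j0 : Nat) : Int)) none)) ".:," := by
  rw [pvLoopDescend text low m j0 hle hmiss]
  obtain ⟨j, rfl⟩ : ∃ j, j0 = j + 1 := ⟨j0 - 1, by omega⟩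
  rw [pvDeleteLoopB, hhit]
  simp

-- lengths of the seven pattern literals
theorem pvLen_va : ("verwijder afspraak" : String).toList.length = 18 := by decide
theorem pvLen_da : ("delete appointment" : String).toList.length = 18 := by decide
theorem pvLen_v : ("verwijder" : String).toList.length = 9 := by decide
theorem pvLen_a : ("annuleer" : String).toList.length = 8 := by decide
theorem pvLen_d : ("delete" : String).toList.length = 6 := by decide
theorem pvLen_c : ("cancel" : String).toList.length = 6 := by decide
theorem pvLen_s : ("schrap" : String).toList.length = 6 := by decide

-- lower preserves length
theorem pvLowerLen (text : String) : (PySem.Str.lower text).toList.length = text.toList.length := by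
  simp [PySem.Str.toList_lower, PySem.Chars.lower]

-- startswith bounds the pattern length
theorem pvSwLen (low p : String) (h : PySem.Str.startswith low p = true) :
    p.toList.length ≤ low.toList.length := by
  rw [PySem.Str.startswith_eq, PySem.Chars.startswith_iff] at h
  exact h.length_le

-- ===== VERDICT (by name: the statement is the Claim_ definition above) =====
theorem extract_title_for_delete_py_spec : Claim_equal_extract_title_for_delete_py := by
  intro text _
  unfold Spec_extract_title_for_delete_py
  simp only [extract_title_for_delete_py, extract_title_for_delete_py_alt, pvSortedPrefixes, pvMaxLen]
  have hlen : (PySem.Str.lower text).toList.length = text.toList.length := pvLowerLen text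
  have htn : (PySem.Str.len text).toNat = text.toList.length := by
    simp [PySem.Str.len_eq, String.length_toList]
  set low := PySem.Str.lower text with hlow
  set m : Nat := min (PySem.Str.len text).toNat 18 with hmdef
  have hm : m ≤ low.toList.length := by omega
  by_cases h1 : PySem.Str.startswith low "verwijder afspraak" = true
  · have hn : (18:Nat) ≤ text.toList.length := by
      have := pvSwLen low _ h1
      simp only [pvLen_va] at this
      omega
    have hmiss : ∀ k, 18 < k → k ≤ m →
        PySem.Set.contains pvPrefixSet (PySem.Str.slice low none (some ((k : Nat) : Int))) = false := by
      intro k hk1 hk2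
      apply pvNoHit low k (by omega)
      intro q hq hl
      simp only [List.mem_cons, List.not_mem_nil, or_false] at hq
      rcases hq with rfl|rfl|rfl|rfl|rfl|rfl|rfl
      all_goals simp only [pvLen_va, pvLen_da, pvLen_v, pvLen_a, pvLen_d, pvLen_c, pvLen_s] at hl
      · omega
      · omega
      · omega
      · omega
      · omega
      · omega
      · omega
    have hhit : PySem.Set.contains pvPrefixSet (PySem.Str.slice low none (some ((18 : Nat) : Int))) = true :=
      (pvSliceMem low 18 (by omega)).2 ⟨_, by simp, pvLen_va, h1⟩
    rw [pvHit text low m 18 (by norm_num) (by omega) hmiss hhit]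
    simp only [pvDeleteLoopA, h1, if_true]
    norm_num [show (("verwijder afspraak":String).length) = 18 from by decide]
  rw [Bool.not_eq_true] at h1
  by_cases h2 : PySem.Str.startswith low "delete appointment" = true
  · have hn : (18:Nat) ≤ text.toList.length := by
      have := pvSwLen low _ h2
      simp only [pvLen_da] at this
      omega
    have hmiss : ∀ k, 18 < k → k ≤ m →
        PySem.Set.contains pvPrefixSet (PySem.Str.slice low none (some ((k : Nat) : Int))) = false := by
      intro k hk1 hk2
      apply pvNoHit low k (by omega)
      intro q hq hl
      simp only [List.mem_cons, List.not_mem_nil, or_false] at hq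
      rcases hq with rfl|rfl|rfl|rfl|rfl|rfl|rfl
      all_goals simp only [pvLen_va, pvLen_da, pvLen_v, pvLen_a, pvLen_d, pvLen_c, pvLen_s] at hl
      · omega
      · omega
      · omega
      · omega
      · omega
      · omega
      · omega
    have hhit : PySem.Set.contains pvPrefixSet (PySem.Str.slice low none (some ((18 : Nat) : Int))) = true :=
      (pvSliceMem low 18 (by omega)).2 ⟨_, by simp, pvLen_da, h2⟩
    rw [pvHit text low m 18 (by norm_num) (by omega) hmiss hhit]
    simp only [pvDeleteLoopA, h1, h2, if_true, Bool.false_eq_true, if_false]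
    norm_num [show (("delete appointment":String).length) = 18 from by decide]
  rw [Bool.not_eq_true] at h2
  by_cases h3 : PySem.Str.startswith low "verwijder" = true
  · have hn : (9:Nat) ≤ text.toList.length := by
      have := pvSwLen low _ h3
      simp only [pvLen_v] at this
      omega
    have hmiss : ∀ k, 9 < k → k ≤ m →
        PySem.Set.contains pvPrefixSet (PySem.Str.slice low none (some ((k : Nat) : Int))) = false := by
      intro k hk1 hk2
      apply pvNoHit low k (by omega)
      intro q hq hl
      simp only [List.mem_cons, List.not_mem_nil, or_false] at hq
      rcases hq with rfl|rfl|rfl|rfl|rfl|rfl|rfl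
      all_goals simp only [pvLen_va, pvLen_da, pvLen_v, pvLen_a, pvLen_d, pvLen_c, pvLen_s] at hl
      · exact h1
      · omega
      · exact h2
      · omega
      · omega
      · omega
      · omega
    have hhit : PySem.Set.contains pvPrefixSet (PySem.Str.slice low none (some ((9 : Nat) : Int))) = true :=
      (pvSliceMem low 9 (by omega)).2 ⟨_, by simp, pvLen_v, h3⟩
    rw [pvHit text low m 9 (by norm_num) (by omega) hmiss hhit]
    simp only [pvDeleteLoopA, h1, h2, h3, if_true, Bool.false_eq_true, if_false]
    norm_num [show (("verwijder":String).length) = 9 from by decide]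
  rw [Bool.not_eq_true] at h3
  by_cases h4 : PySem.Str.startswith low "annuleer" = true
  · have hn : (8:Nat) ≤ text.toList.length := by
      have := pvSwLen low _ h4
      simp only [pvLen_a] at this
      omega
    have hmiss : ∀ k, 8 < k → k ≤ m →
        PySem.Set.contains pvPrefixSet (PySem.Str.slice low none (some ((k : Nat) : Int))) = false := by
      intro k hk1 hk2
      apply pvNoHit low k (by omega)
      intro q hq hl
      simp only [List.mem_cons, List.not_mem_nil, or_false] at hq
      rcases hq with rfl|rfl|rfl|rfl|rfl|rfl|rfl
      all_goals simp only [pvLen_va, pvLen_da, pvLen_v, pvLen_a, pvLen_d, pvLen_c, pvLen_s] at hl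
      · exact h1
      · exact h3
      · exact h2
      · omega
      · omega
      · omega
      · omega
    have hhit : PySem.Set.contains pvPrefixSet (PySem.Str.slice low none (some ((8 : Nat) : Int))) = true :=
      (pvSliceMem low 8 (by omega)).2 ⟨_, by simp, pvLen_a, h4⟩
    rw [pvHit text low m 8 (by norm_num) (by omega) hmiss hhit]
    simp only [pvDeleteLoopA, h1, h2, h3, h4, if_true, Bool.false_eq_true, if_false]
    norm_num [show (("annuleer":String).length) = 8 from by decide]
  rw [Bool.not_eq_true] at h4
  by_cases h5 : PySem.Str.startswith low "delete" = true
  · have hn : (6:Nat) ≤ text.toList.length := by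
      have := pvSwLen low _ h5
      simp only [pvLen_d] at this
      omega
    have hmiss : ∀ k, 6 < k → k ≤ m →
        PySem.Set.contains pvPrefixSet (PySem.Str.slice low none (some ((k : Nat) : Int))) = false := by
      intro k hk1 hk2
      apply pvNoHit low k (by omega)
      intro q hq hl
      simp only [List.mem_cons, List.not_mem_nil, or_false] at hq
      rcases hq with rfl|rfl|rfl|rfl|rfl|rfl|rfl
      all_goals simp only [pvLen_va, pvLen_da, pvLen_v, pvLen_a, pvLen_d, pvLen_c, pvLen_s] at hl
      · exact h1
      · exact h3
      · exact h2
      · omega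
      · exact h4
      · omega
      · omega
    have hhit : PySem.Set.contains pvPrefixSet (PySem.Str.slice low none (some ((6 : Nat) : Int))) = true :=
      (pvSliceMem low 6 (by omega)).2 ⟨_, by simp, pvLen_d, h5⟩
    rw [pvHit text low m 6 (by norm_num) (by omega) hmiss hhit]
    simp only [pvDeleteLoopA, h1, h2, h3, h4, h5, if_true, Bool.false_eq_true, if_false]
    norm_num [show (("delete":String).length) = 6 from by decide]
  rw [Bool.not_eq_true] at h5
  by_cases h6 : PySem.Str.startswith low "cancel" = true
  · have hn : (6:Nat) ≤ text.toList.length := by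
      have := pvSwLen low _ h6
      simp only [pvLen_c] at this
      omega
    have hmiss : ∀ k, 6 < k → k ≤ m →
        PySem.Set.contains pvPrefixSet (PySem.Str.slice low none (some ((k : Nat) : Int))) = false := by
      intro k hk1 hk2
      apply pvNoHit low k (by omega)
      intro q hq hl
      simp only [List.mem_cons, List.not_mem_nil, or_false] at hq
      rcases hq with rfl|rfl|rfl|rfl|rfl|rfl|rfl
      all_goals simp only [pvLen_va, pvLen_da, pvLen_v, pvLen_a, pvLen_d, pvLen_c, pvLen_s] at hl
      · exact h1
      · exact h3
      · exact h2
      · omega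
      · exact h4
      · omega
      · omega
    have hhit : PySem.Set.contains pvPrefixSet (PySem.Str.slice low none (some ((6 : Nat) : Int))) = true :=
      (pvSliceMem low 6 (by omega)).2 ⟨_, by simp, pvLen_c, h6⟩
    rw [pvHit text low m 6 (by norm_num) (by omega) hmiss hhit]
    simp only [pvDeleteLoopA, h1, h2, h3, h4, h5, h6, if_true, Bool.false_eq_true, if_false]
    norm_num [show (("cancel":String).length) = 6 from by decide]
  rw [Bool.not_eq_true] at h6
  by_cases h7 : PySem.Str.startswith low "schrap" = true
  · have hn : (6:Nat) ≤ text.toList.length := by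
      have := pvSwLen low _ h7
      simp only [pvLen_s] at this
      omega
    have hmiss : ∀ k, 6 < k → k ≤ m →
        PySem.Set.contains pvPrefixSet (PySem.Str.slice low none (some ((k : Nat) : Int))) = false := by
      intro k hk1 hk2
      apply pvNoHit low k (by omega)
      intro q hq hl
      simp only [List.mem_cons, List.not_mem_nil, or_false] at hq
      rcases hq with rfl|rfl|rfl|rfl|rfl|rfl|rfl
      all_goals simp only [pvLen_va, pvLen_da, pvLen_v, pvLen_a, pvLen_d, pvLen_c, pvLen_s] at hl
      · exact h1
      · exact h3
      · exact h2
      · omega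
      · exact h4
      · omega
      · omega
    have hhit : PySem.Set.contains pvPrefixSet (PySem.Str.slice low none (some ((6 : Nat) : Int))) = true :=
      (pvSliceMem low 6 (by omega)).2 ⟨_, by simp, pvLen_s, h7⟩
    rw [pvHit text low m 6 (by norm_num) (by omega) hmiss hhit]
    simp only [pvDeleteLoopA, h1, h2, h3, h4, h5, h6, h7, if_true, Bool.false_eq_true, if_false]
    norm_num [show (("schrap":String).length) = 6 from by decide]
  rw [Bool.not_eq_true] at h7
  have hmiss : ∀ k, 0 < k → k ≤ m →
      PySem.Set.contains pvPrefixSet (PySem.Str.slice low none (some ((k : Nat) : Int))) = false := by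
    intro k hk1 hk2
    apply pvNoHit low k (by omega)
    intro q hq hl
    simp only [List.mem_cons, List.not_mem_nil, or_false] at hq
    rcases hq with rfl|rfl|rfl|rfl|rfl|rfl|rfl
    · exact h1
    · exact h3
    · exact h2
    · exact h5
    · exact h4
    · exact h6
    · exact h7
  rw [pvLoopDescend text low m 0 (Nat.zero_le _) hmiss]
  simp only [pvDeleteLoopA, pvDeleteLoopB, h1, h2, h3, h4, h5, h6, h7, Bool.false_eq_true, if_false]
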